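-- pv_equiv track=rewrite | github.com/Noamshabat1/Python-Wordsearch | wordsearch.py | recursion_in_matrix
-- ===== SOURCE A (Python) =====
-- def add_one_in_dir(last, dir):
--     """
--     This func is aid function that helps the recursive to work and get
--     all the values.
--     :param last: the point which we have lest been.
--     :param dir: the current directions.
--     :return: coordinates of the next position.
--     """
--     if dir == "u":
--         return last[0] - 1, last[1]
--     elif dir == "d":
--         return last[0] + 1, last[1]
--     elif dir == "l":
--         return last[0], last[1] - 1
--     elif dir == "r":
--         return last[0], last[1] + 1
--     elif dir == "w":
--         return last[0] - 1, last[1] + 1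
--     elif dir == "x":
--         return last[0] - 1, last[1] - 1
--     elif dir == "y":
--         return last[0] + 1, last[1] + 1
--     else:
--         return last[0] + 1, last[1] - 1
--
-- def recursion_in_matrix(path, matrix, dir):
--     """
--     This func is the recursive engine that is going over the matrix
--     in all the combinations in the desired direction.
--     :param path: the current directions.
--     :param matrix: a 2D list of the matrix (board) of the game.
--     :param dir: the direction of the path.
--     :return: a list of all the combinations in the desired direction.
--     """
--     row_length = len(matrix)
--     col_length = len(matrix[0])
--
--     last = path[-1]
--     new_coord = add_one_in_dir(last, dir)
--
--     if (new_coord[0] >= row_length or new_coord[0] < 0 or new_coord[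
--         1] >= col_length
--             or new_coord[1] < 0):
--         return []
--
--     new_path = path + [new_coord]
--     word = ""
--     for coord in new_path:
--         word += matrix[coord[0]][coord[1]]
--
--     return [word] + recursion_in_matrix(new_path, matrix, dir)
-- ===== SOURCE B (Python) =====
-- def add_one_in_dir(last, dir):
--     if dir == "u":
--         return last[0] - 1, last[1]
--     elif dir == "d":
--         return last[0] + 1, last[1]
--     elif dir == "l":
--         return last[0], last[1] - 1
--     elif dir == "r":
--         return last[0], last[1] + 1
--     elif dir == "w":
--         return last[0] - 1, last[1] + 1
--     elif dir == "x":
--         return last[0] - 1, last[1] - 1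
--     elif dir == "y":
--         return last[0] + 1, last[1] + 1
--     else:
--         return last[0] + 1, last[1] - 1
--
--
-- def recursion_in_matrix(path, matrix, dir):
--     rows = len(matrix)
--     cols = len(matrix[0])
--
--     def in_bounds(rc):
--         return 0 <= rc[0] < rows and 0 <= rc[1] < cols
--
--     cur = add_one_in_dir(path[-1], dir)
--     if not in_bounds(cur):
--         return []
--     word = "".join(matrix[r][c] for r, c in path)
--     words = []
--     while in_bounds(cur):
--         word += matrix[cur[0]][cur[1]]
--         words.append(word)
--         cur = add_one_in_dir(cur, dir)
--     return words
-- ===== Notes on version B (the rewrite author's own statement) =====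
-- stated objective: simpler
-- what changed: Replaced A's recursion, which rebuilds the whole word from scratch over path++steps at every level, by one first-step bounds check, one base-word pass over path, and an iterative while-loop that extends the running word one cell per step.
-- outside the precondition, e.g. on recursion_in_matrix([(0, 0)], [['a', 'b'], ['c']], 'd'): A returns ['ac'], B returns ['ac']
import Mathlib
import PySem

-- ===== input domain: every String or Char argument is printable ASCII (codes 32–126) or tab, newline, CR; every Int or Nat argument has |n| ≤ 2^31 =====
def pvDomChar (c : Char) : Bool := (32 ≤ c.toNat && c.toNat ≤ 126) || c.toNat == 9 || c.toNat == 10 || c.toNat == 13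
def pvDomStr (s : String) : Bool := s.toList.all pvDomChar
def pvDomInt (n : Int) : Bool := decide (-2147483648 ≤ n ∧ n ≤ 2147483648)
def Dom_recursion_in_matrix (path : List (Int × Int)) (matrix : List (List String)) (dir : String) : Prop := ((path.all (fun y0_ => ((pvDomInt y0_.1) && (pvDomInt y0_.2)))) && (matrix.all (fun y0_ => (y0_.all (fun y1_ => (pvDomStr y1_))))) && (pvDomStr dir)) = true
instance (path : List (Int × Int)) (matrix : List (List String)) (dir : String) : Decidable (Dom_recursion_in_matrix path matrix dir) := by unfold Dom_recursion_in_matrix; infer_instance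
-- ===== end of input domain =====

-- B replaces A's recursion (which rebuilds the word over the whole path at every level) by one
-- base-word pass followed by an iterative walk that extends the word one cell at a time (objective:
-- simpler / avoids re-scanning the path each step). Return value only; neither mutates its arguments.

-- ===== PORT A =====
-- shared helper: both Pythons contain exactly this function
def add_one_in_dir (last : Int × Int) (dir : String) : Int × Int :=
  if dir = "u" then (last.1 - 1, last.2)
  else if dir = "d" then (last.1 + 1, last.2)
  else if dir = "l" then (last.1, last.2 - 1)
  else if dir = "r" then (last.1, last.2 + 1)
  else if dir = "w" then (last.1 - 1, last.2 + 1)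
  else if dir = "x" then (last.1 - 1, last.2 - 1)
  else if dir = "y" then (last.1 + 1, last.2 + 1)
  else (last.1 + 1, last.2 - 1)

-- matrix[r][c] with Python indexing; total with defaults, exact on Pre_ (all accesses in range there)
def pvCell (matrix : List (List String)) (rc : Int × Int) : String :=
  (PySem.List.pyGet? ((PySem.List.pyGet? matrix rc.1).getD []) rc.2).getD ""

-- A's recursion, fueled (Python A terminates; fuel rows+cols+1 is never exhausted on real runs,
-- since the in-bounds coordinate moved by the fixed dir is strictly monotone)
def pvRecA (matrix : List (List String)) (dir : String) : Nat → List (Int × Int) → List String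
  | 0, _ => []
  | fuel + 1, path =>
    let rows : Int := matrix.length
    let cols : Int := (matrix.headD []).length
    let last := path.getLast?.getD (0, 0)
    let nc := add_one_in_dir last dir
    if nc.1 ≥ rows || nc.1 < 0 || nc.2 ≥ cols || nc.2 < 0 then []
    else
      let np := path ++ [nc]
      let word := np.foldl (fun w c => w ++ pvCell matrix c) ""
      word :: pvRecA matrix dir fuel np

def recursion_in_matrix (path : List (Int × Int)) (matrix : List (List String)) (dir : String) : List String :=
  pvRecA matrix dir (matrix.length + (matrix.headD []).length + 1) path

-- ===== PORT B =====
-- Source B's in_bounds helper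
def pvInB (matrix : List (List String)) (rc : Int × Int) : Bool :=
  (0 ≤ rc.1 && rc.1 < (matrix.length : Int)) && (0 ≤ rc.2 && rc.2 < ((matrix.headD []).length : Int))

-- the while-loop of Source B: while in_bounds, extend the running word, emit it, step
def pvLoopB (matrix : List (List String)) (dir : String) : Nat → (Int × Int) → String → List String
  | 0, _, _ => []
  | fuel + 1, cur, word =>
    if pvInB matrix cur then
      let w := word ++ pvCell matrix cur
      w :: pvLoopB matrix dir fuel (add_one_in_dir cur dir) w
    else []

def recursion_in_matrix_alt (path : List (Int × Int)) (matrix : List (List String)) (dir : String) : List String :=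
  let cur := add_one_in_dir (path.getLast?.getD (0, 0)) dir
  if pvInB matrix cur then
    let word := path.foldl (fun w c => w ++ pvCell matrix c) ""
    pvLoopB matrix dir (matrix.length + (matrix.headD []).length + 1) cur word
  else []

-- ===== PRECONDITION & SPEC =====
-- Pre_ excludes the inputs where Python A raises (empty path or matrix; a path cell outside Python
-- index range, or a walk cell in a too-short ragged row, reached by word-building) — except that when
-- the very first step is already out of bounds both programs return [] without reading any cell, so
-- those inputs stay inside; the only excluded inputs on which A returns are ragged matrices whose
-- short rows the word-building happens to avoid (see the cite).
def Pre_recursion_in_matrix (path : List (Int × Int)) (matrix : List (List String)) (dir : String) : Prop :=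
  matrix ≠ [] ∧ path ≠ [] ∧
  ((∃ last ∈ path.getLast?, pvInB matrix (add_one_in_dir last dir) = false) ∨
   ((∀ row ∈ matrix, (matrix.headD []).length ≤ row.length) ∧
    (∀ rc ∈ path, -(matrix.length : Int) ≤ rc.1 ∧ rc.1 < (matrix.length : Int) ∧
        -((matrix.headD []).length : Int) ≤ rc.2 ∧ rc.2 < ((matrix.headD []).length : Int))))
instance (path : List (Int × Int)) (matrix : List (List String)) (dir : String) : Decidable (Pre_recursion_in_matrix path matrix dir) := by unfold Pre_recursion_in_matrix; infer_instance

def pvWitness_recursion_in_matrix : (List (Int × Int)) × List (List String) × String :=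
  ([(0, 0)], [["a", "b"], ["c", "d"]], "r")

def Spec_recursion_in_matrix (path : List (Int × Int)) (matrix : List (List String)) (dir : String) (out : List String) : Prop := out = recursion_in_matrix_alt path matrix dir
instance (path : List (Int × Int)) (matrix : List (List String)) (dir : String) (out : List String) : Decidable (Spec_recursion_in_matrix path matrix dir out) := by unfold Spec_recursion_in_matrix; infer_instance

-- ===== CLAIM (what is proved, stated in full; the proofs are below) =====
def Claim_equal_recursion_in_matrix : Prop := ∀ (path : List (Int × Int)) (matrix : List (List String)) (dir : String), Dom_recursion_in_matrix path matrix dir → Pre_recursion_in_matrix path matrix dir → Spec_recursion_in_matrix path matrix dir (recursion_in_matrix path matrix dir)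

-- ===== LEMMAS AND PROOFS =====
-- A's exit test is the negation of Source B's in_bounds
theorem pvInB_not (matrix : List (List String)) (nc : Int × Int) :
    (nc.1 ≥ (matrix.length : Int) || nc.1 < 0 || nc.2 ≥ ((matrix.headD []).length : Int) || nc.2 < 0)
      = !pvInB matrix nc := by
  rw [Bool.eq_iff_iff]
  simp [pvInB]
  omega

-- The two ports agree for ANY common fuel: A's per-level word over path ++ steps equals B's running word.
theorem pvRecA_eq_loopB (matrix : List (List String)) (dir : String) :
    ∀ (fuel : Nat) (path : List (Int × Int)),
      pvRecA matrix dir fuel path =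
        pvLoopB matrix dir fuel (add_one_in_dir (path.getLast?.getD (0, 0)) dir)
          (path.foldl (fun w c => w ++ pvCell matrix c) "") := by
  intro fuel
  induction fuel with
  | zero => intro path; rfl
  | succ n ih =>
    intro path
    simp only [pvRecA, pvLoopB, pvInB_not]
    by_cases h : pvInB matrix (add_one_in_dir (path.getLast?.getD (0, 0)) dir)
    · rw [h]
      simp only [Bool.not_true, Bool.false_eq_true, if_false, if_true]
      rw [ih (path ++ [add_one_in_dir (path.getLast?.getD (0, 0)) dir])]
      simp [List.foldl_append, List.getLast?_append]
    · rw [Bool.not_eq_true] at h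
      rw [h]
      simp only [Bool.not_false, if_true, Bool.false_eq_true, if_false]

-- ===== VERDICT (by name: the statement is the Claim_ definition above) =====
theorem recursion_in_matrix_spec : Claim_equal_recursion_in_matrix := by
  intro path matrix dir _ _
  unfold Spec_recursion_in_matrix recursion_in_matrix recursion_in_matrix_alt
  rw [pvRecA_eq_loopB matrix dir _ path]
  by_cases h : pvInB matrix (add_one_in_dir (path.getLast?.getD (0, 0)) dir)
  · simp [h]
  · simp [h, pvLoopB]
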